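-- pv_equiv track=rewrite | github.com/saudag-28/16891-Multi-Agent-Planning-and-Coordination | 16891_HW1_Sp25/single_agent_planner.py | generate_motions_recursive
-- ===== SOURCE A (Python) =====
-- def generate_motions_recursive(num_agents, cur_agent):
--     directions = [(0, -1), (1, 0), (0, 1), (-1, 0), (0, 0)]
--
--     joint_state_motions = []
--
--     if (cur_agent == num_agents):
--         return [[]]
--
--     sub_motions = generate_motions_recursive(num_agents, cur_agent+1)
--
--     for direction in directions:
--         for sub_motion in sub_motions:
--             joint_state_motions.append([direction] + sub_motion)
--
--     return joint_state_motions
-- ===== SOURCE B (Python) =====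
-- import itertools
--
-- def generate_motions_recursive(num_agents, cur_agent):
--     directions = [(0, -1), (1, 0), (0, 1), (-1, 0), (0, 0)]
--     k = num_agents - cur_agent
--     return [list(combo) for combo in itertools.product(directions, repeat=k)]
-- ===== Notes on version B (the rewrite author's own statement) =====
-- stated objective: idiomatic
-- what changed: Replaces the explicit recursion with a single list comprehension over itertools.product(directions, repeat=num_agents-cur_agent), whose rightmost-fastest ordering matches the recursion's order.
import Mathlib
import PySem

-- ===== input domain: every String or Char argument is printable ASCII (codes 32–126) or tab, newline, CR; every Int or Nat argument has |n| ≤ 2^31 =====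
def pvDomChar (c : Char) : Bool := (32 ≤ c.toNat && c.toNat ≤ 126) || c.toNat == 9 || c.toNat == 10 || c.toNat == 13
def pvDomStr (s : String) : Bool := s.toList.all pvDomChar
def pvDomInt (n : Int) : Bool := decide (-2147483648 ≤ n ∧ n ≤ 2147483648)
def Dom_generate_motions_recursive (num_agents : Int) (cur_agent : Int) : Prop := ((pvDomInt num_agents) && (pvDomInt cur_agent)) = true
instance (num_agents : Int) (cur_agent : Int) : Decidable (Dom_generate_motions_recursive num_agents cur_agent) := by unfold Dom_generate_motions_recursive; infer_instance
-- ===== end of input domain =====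

-- B replaces A's recursion by an itertools.product comprehension (same order); equivalence is about the return value.

-- ===== PORT A =====
-- A recurses on cur_agent+1 until cur_agent == num_agents; the 'else []' guard only
-- totalises the Lean definition for cur_agent > num_agents, where the Python diverges
-- (excluded by Pre_).
def generate_motions_recursive (num_agents : Int) (cur_agent : Int) : List (List (Int × Int)) :=
  let directions : List (Int × Int) := [(0, -1), (1, 0), (0, 1), (-1, 0), (0, 0)]
  if cur_agent = num_agents then [[]]
  else if cur_agent < num_agents then
    let sub_motions := generate_motions_recursive num_agents (cur_agent + 1)
    directions.foldl (fun acc direction =>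
      sub_motions.foldl (fun acc2 sub_motion => acc2 ++ [direction :: sub_motion]) acc) []
  else []
termination_by (num_agents - cur_agent).toNat
decreasing_by omega

-- ===== PORT B =====
-- itertools.product(directions, repeat=k): leftmost slot varies slowest.
def pvProduct (directions : List (Int × Int)) : Nat → List (List (Int × Int))
  | 0 => [[]]
  | k + 1 => directions.flatMap (fun d => (pvProduct directions k).map (fun rest => d :: rest))

def generate_motions_recursive_alt (num_agents : Int) (cur_agent : Int) : List (List (Int × Int)) :=
  let directions : List (Int × Int) := [(0, -1), (1, 0), (0, 1), (-1, 0), (0, 0)]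
  pvProduct directions (num_agents - cur_agent).toNat

-- ===== PRECONDITION & SPEC =====
-- Pre_ excludes cur_agent > num_agents, where the Python A recurses forever (RecursionError)
-- and B raises ValueError (negative repeat).
def Pre_generate_motions_recursive (num_agents : Int) (cur_agent : Int) : Prop := cur_agent ≤ num_agents
instance (num_agents : Int) (cur_agent : Int) : Decidable (Pre_generate_motions_recursive num_agents cur_agent) := by unfold Pre_generate_motions_recursive; infer_instance
def pvWitness_generate_motions_recursive : Int × Int := (3, 1)

def Spec_generate_motions_recursive (num_agents : Int) (cur_agent : Int) (out : List (List (Int × Int))) : Prop := out = generate_motions_recursive_alt num_agents cur_agent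
instance (num_agents : Int) (cur_agent : Int) (out : List (List (Int × Int))) : Decidable (Spec_generate_motions_recursive num_agents cur_agent out) := by unfold Spec_generate_motions_recursive; infer_instance

-- ===== CLAIM (what is proved, stated in full; the proofs are below) =====
def Claim_equal_generate_motions_recursive : Prop := ∀ (num_agents : Int) (cur_agent : Int), Dom_generate_motions_recursive num_agents cur_agent → Pre_generate_motions_recursive num_agents cur_agent → Spec_generate_motions_recursive num_agents cur_agent (generate_motions_recursive num_agents cur_agent)

-- ===== LEMMAS AND PROOFS =====

lemma gmr_eq_product (k : Nat) : ∀ (num cur : Int), num - cur = (k : Int) →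
    generate_motions_recursive num cur =
      pvProduct [(0, -1), (1, 0), (0, 1), (-1, 0), (0, 0)] k := by
  induction k with
  | zero =>
    intro num cur h
    have hc : cur = num := by omega
    rw [generate_motions_recursive]
    simp [hc, pvProduct]
  | succ k ih =>
    intro num cur h
    have hne : ¬ cur = num := by omega
    have hlt : cur < num := by omega
    rw [generate_motions_recursive]
    simp only [hne, hlt, if_false, if_pos]
    rw [ih num (cur + 1) (by omega)]
    -- turn the nested append-foldl into flatMap/map
    have inner : ∀ (d : Int × Int) (sub acc : List (List (Int × Int))),
        sub.foldl (fun acc2 s => acc2 ++ [d :: s]) acc = acc ++ sub.map (fun s => d :: s) :=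
      fun d sub acc => PySem.List.foldl_append_singleton_eq_map (fun s => d :: s) sub acc
    rw [show (fun (acc : List (List (Int × Int))) (direction : Int × Int) =>
        (pvProduct [(0, -1), (1, 0), (0, 1), (-1, 0), (0, 0)] k).foldl
          (fun acc2 s => acc2 ++ [direction :: s]) acc)
      = (fun acc direction => acc ++
          (pvProduct [(0, -1), (1, 0), (0, 1), (-1, 0), (0, 0)] k).map
            (fun s => direction :: s)) from funext fun acc => funext fun d => inner d _ acc]
    rw [PySem.List.foldl_append_eq_flatMap]
    simp [pvProduct]

-- ===== VERDICT (by name: the statement is the Claim_ definition above) =====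
theorem generate_motions_recursive_spec : Claim_equal_generate_motions_recursive := by
  intro num cur _ hpre
  unfold Spec_generate_motions_recursive generate_motions_recursive_alt
  have hk : num - cur = (((num - cur).toNat : Nat) : Int) := by
    have : (0 : Int) ≤ num - cur := by exact sub_nonneg.mpr hpre
    omega
  exact gmr_eq_product (num - cur).toNat num cur hk
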